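-- pv_equiv track=rewrite | github.com/secureighty/AdventOfCode2020 | Day17/Cube.py | iterate_modifier_array
-- ===== SOURCE A (Python) =====
-- def iterate_modifier_array(modifier_array):
--     i = 0
--     while i < len(modifier_array):
--         if modifier_array[i] != 1:
--             modifier_array[i] += 1
--             return True
--         else:
--             modifier_array[i] = -1
--             i += 1
--     return False
-- ===== SOURCE B (Python) =====
-- def iterate_modifier_array(modifier_array):
--     # ripple-carry successor as a single total fold: rebuild the whole list with a carry flag
--     out = []
--     carry = True
--     for d in modifier_array:
--         if carry and d == 1:
--             out.append(-1)
--         elif carry: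
--             out.append(d + 1)
--             carry = False
--         else:
--             out.append(d)
--     modifier_array[:] = out
--     return not carry
-- ===== Notes on version B (the rewrite author's own statement) =====
-- stated objective: alternative
-- what changed: B computes the ripple-carry successor as one total fold that rebuilds the entire list with a carry flag (no early exit, no index arithmetic) and then assigns it back wholesale, returning 'not carry'; A instead scans in place with an early return at the first non-1 element.
import Mathlib
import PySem

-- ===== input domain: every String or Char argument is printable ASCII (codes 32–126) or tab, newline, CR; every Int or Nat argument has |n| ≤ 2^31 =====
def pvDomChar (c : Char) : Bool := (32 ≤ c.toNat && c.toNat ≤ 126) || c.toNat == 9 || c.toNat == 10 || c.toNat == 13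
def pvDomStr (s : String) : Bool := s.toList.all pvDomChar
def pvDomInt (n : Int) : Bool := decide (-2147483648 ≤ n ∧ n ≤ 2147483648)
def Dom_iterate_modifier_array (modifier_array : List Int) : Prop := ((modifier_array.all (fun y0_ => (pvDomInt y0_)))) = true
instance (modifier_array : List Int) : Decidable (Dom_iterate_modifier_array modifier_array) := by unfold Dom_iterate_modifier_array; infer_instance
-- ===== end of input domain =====

-- B rebuilds the whole successor list in one total carry-fold (no early exit) and returns 'not carry',
-- where A scans in place with an early return; both Pythons mutate the argument list identically, and
-- the equivalence proved here is about the return value.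

-- ===== PORT A =====
-- A's while loop walks the list; the loop state is the remaining suffix: if the current element ≠ 1
-- it increments it and returns True, else it sets it to -1 and moves on; falling off returns False.
def iterAGo (rest : List Int) : Bool :=
  match rest with
  | [] => false
  | x :: xs => if x ≠ 1 then true else iterAGo xs

def iterate_modifier_array (modifier_array : List Int) : Bool :=
  iterAGo modifier_array

-- ===== PORT B =====
-- Source B's loop body: state is (out, carry); every element is processed (no early exit).
def altStep (st : List Int × Bool) (d : Int) : List Int × Bool :=
  if st.2 && d == 1 then (st.1 ++ [-1], true)
  else if st.2 then (st.1 ++ [d + 1], false)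
  else (st.1 ++ [d], false)

def iterate_modifier_array_alt (modifier_array : List Int) : Bool :=
  !(modifier_array.foldl altStep ([], true)).2

-- ===== PRECONDITION & SPEC =====
def Spec_iterate_modifier_array (modifier_array : List Int) (out : Bool) : Prop := out = iterate_modifier_array_alt modifier_array
instance (modifier_array : List Int) (out : Bool) : Decidable (Spec_iterate_modifier_array modifier_array out) := by unfold Spec_iterate_modifier_array; infer_instance

-- ===== CLAIM (what is proved, stated in full; the proofs are below) =====
def Claim_equal_iterate_modifier_array : Prop := ∀ (modifier_array : List Int), Dom_iterate_modifier_array modifier_array → Spec_iterate_modifier_array modifier_array (iterate_modifier_array modifier_array)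

-- ===== LEMMAS AND PROOFS =====
-- The carry after the fold is 'carry in ∧ every element equals 1'.
theorem altStep_carry (xs : List Int) (out : List Int) (c : Bool) :
    (xs.foldl altStep (out, c)).2 = (c && xs.all (· == 1)) := by
  induction xs generalizing out c with
  | nil => simp
  | cons x xs ih =>
    simp only [List.foldl_cons, List.all_cons, altStep]
    by_cases hc : c
    · subst hc
      by_cases hx : x = 1
      · subst hx; simpa using ih _ true
      · have hb : (x == 1) = false := by simpa using hx
        simp [hb, ih]
    · have hc' : c = false := by simpa using hc
      subst hc'
      simp [ih]

-- A returns False exactly when every element equals 1.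
theorem iterAGo_eq (xs : List Int) : iterAGo xs = !xs.all (· == 1) := by
  induction xs with
  | nil => simp [iterAGo]
  | cons x xs ih =>
    simp only [iterAGo, List.all_cons]
    by_cases hx : x = 1
    · subst hx; simpa using ih
    · have hb : (x == 1) = false := by simpa using hx
      simp [hx, hb]

-- ===== VERDICT (by name: the statement is the Claim_ definition above) =====
theorem iterate_modifier_array_spec : Claim_equal_iterate_modifier_array := by
  intro xs _
  unfold Spec_iterate_modifier_array iterate_modifier_array iterate_modifier_array_alt
  rw [altStep_carry, iterAGo_eq]
  simp
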